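-- pv_equiv track=rewrite | github.com/TaoyuMei/Python_Practice_BioMacroMolecule | geography_weather_visualise.py | generate_ytick_inputs
-- ===== SOURCE A (Python) =====
-- def generate_ytick_inputs(continent_to_countries):
--     """generate two list,
--     i.e. the center y-value for each continent
--     and the corresponding continent names"""
--     center_y_list = []
--     y_value = 0 #begin with the zero point of y-axis
--     continent_list = list(continent_to_countries.keys())
--     continent_list.sort()
--     for continent in continent_list:
--         country_number = len(continent_to_countries[continent])
--         y_value += country_number//2
--         center_y_list += [y_value]
--         y_value += country_number//2 + country_number%2
--         #make sure that y_value corresponds to the first country on the next continent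
--     return (center_y_list, continent_list)
-- ===== SOURCE B (Python) =====
-- def generate_ytick_inputs(continent_to_countries):
--     """generate two list,
--     i.e. the center y-value for each continent
--     and the corresponding continent names"""
--     continent_list = sorted(continent_to_countries)
--     counts = [len(continent_to_countries[c]) for c in continent_list]
--     offsets = [0]
--     for c in counts:
--         offsets.append(offsets[-1] + c)
--     center_y_list = [off + c // 2 for off, c in zip(offsets, counts)]
--     return (center_y_list, continent_list)
-- ===== Notes on version B (the rewrite author's own statement) =====
-- stated objective: alternative
-- what changed: Replaces A's single interleaved loop carrying a running y accumulator with a counts-then-offsets-then-centers pipeline: materialize the per-continent counts, build the cumulative offsets list by a prefix-sum pass, then zip offsets with counts to compute each center as offset + count//2.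
import Mathlib
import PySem

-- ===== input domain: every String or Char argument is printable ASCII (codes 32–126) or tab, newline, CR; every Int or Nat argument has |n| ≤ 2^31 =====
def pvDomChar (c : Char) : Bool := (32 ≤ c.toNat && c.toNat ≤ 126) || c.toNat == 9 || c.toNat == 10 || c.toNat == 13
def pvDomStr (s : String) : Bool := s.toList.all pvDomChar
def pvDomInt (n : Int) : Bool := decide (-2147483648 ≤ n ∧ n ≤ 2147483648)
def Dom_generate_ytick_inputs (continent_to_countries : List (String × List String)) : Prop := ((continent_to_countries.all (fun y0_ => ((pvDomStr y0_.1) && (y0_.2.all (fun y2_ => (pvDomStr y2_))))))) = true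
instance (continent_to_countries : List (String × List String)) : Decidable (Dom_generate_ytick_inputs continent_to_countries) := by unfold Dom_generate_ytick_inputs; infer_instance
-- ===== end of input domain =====

-- B replaces A's interleaved running-accumulator loop by a counts / prefix-sum offsets / zip pipeline (alternative decomposition, same cost).

-- ===== PORT A =====
def generate_ytick_inputs (continent_to_countries : List (String × List String)) : List Int × List String :=
  let d := PySem.Dict.ofList continent_to_countries
  let continent_list := PySem.List.sorted d.keys (fun x => x) false
  let r := continent_list.foldl
    (fun (s : List Int × Int) continent =>
      let country_number : Int := ((d.getD continent []).length : Int)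
      let y_value := s.2 + PySem.Int.floordiv country_number 2
      (s.1 ++ [y_value],
       y_value + PySem.Int.floordiv country_number 2 + PySem.Int.mod country_number 2))
    ([], 0)
  (r.1, continent_list)

-- ===== PORT B =====
def generate_ytick_inputs_alt (continent_to_countries : List (String × List String)) : List Int × List String :=
  let d := PySem.Dict.ofList continent_to_countries
  let continent_list := PySem.List.sorted d.keys (fun x => x) false
  let counts : List Int := continent_list.map (fun c => ((d.getD c []).length : Int))
  let offsets : List Int := counts.foldl (fun os c => os ++ [os.getLast! + c]) [0]
  let center_y_list := (offsets.zip counts).map (fun p => p.1 + PySem.Int.floordiv p.2 2)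
  (center_y_list, continent_list)

-- ===== PRECONDITION & SPEC =====
def Spec_generate_ytick_inputs (continent_to_countries : List (String × List String)) (out : List Int × List String) : Prop := out = generate_ytick_inputs_alt continent_to_countries
instance (continent_to_countries : List (String × List String)) (out : List Int × List String) : Decidable (Spec_generate_ytick_inputs continent_to_countries out) := by unfold Spec_generate_ytick_inputs; infer_instance

-- ===== CLAIM (what is proved, stated in full; the proofs are below) =====
def Claim_equal_generate_ytick_inputs : Prop := ∀ (continent_to_countries : List (String × List String)), Dom_generate_ytick_inputs continent_to_countries → Spec_generate_ytick_inputs continent_to_countries (generate_ytick_inputs continent_to_countries)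

-- ===== LEMMAS AND PROOFS =====

-- reference "scan": centers and prefix offsets of a count list starting at y
def pvScan (y : Int) : List Int → List Int
  | [] => [y]
  | c :: t => y :: pvScan (y + c) t

def pvCenters (y : Int) : List Int → List Int
  | [] => []
  | c :: t => (y + PySem.Int.floordiv c 2) :: pvCenters (y + c) t

theorem pvA_fold (g : String → Int) (l : List String) (acc : List Int) (y : Int) :
    (l.foldl
      (fun (s : List Int × Int) continent =>
        let n := g continent
        let yv := s.2 + PySem.Int.floordiv n 2
        (s.1 ++ [yv], yv + PySem.Int.floordiv n 2 + PySem.Int.mod n 2))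
      (acc, y)).1 = acc ++ pvCenters y (l.map g) := by
  induction l generalizing acc y with
  | nil => simp [pvCenters]
  | cons c t ih =>
    have hdm := PySem.Int.floordiv_mul_add_mod (g c) 2
    simp only [List.foldl_cons, List.map_cons, pvCenters]
    have h2 : y + PySem.Int.floordiv (g c) 2 + PySem.Int.floordiv (g c) 2 + PySem.Int.mod (g c) 2
        = y + g c := by omega
    rw [h2, ih]
    simp

theorem pvB_offsets (cs : List Int) (pre : List Int) (y : Int) :
    cs.foldl (fun os c => os ++ [os.getLast! + c]) (pre ++ [y]) = pre ++ pvScan y cs := by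
  induction cs generalizing pre y with
  | nil => simp [pvScan]
  | cons c t ih =>
    simp only [List.foldl_cons, pvScan]
    have hlast : (pre ++ [y]).getLast! = y := by
      induction pre <;> simp [List.getLast!, List.getLast_append] <;> rfl
    rw [hlast]
    have : pre ++ [y] ++ [y + c] = (pre ++ [y]) ++ [y + c] := by simp
    rw [this, ih]
    simp [pvScan]

theorem pvB_centers (cs : List Int) (y : Int) :
    ((pvScan y cs).zip cs).map (fun p => p.1 + PySem.Int.floordiv p.2 2) = pvCenters y cs := by
  induction cs generalizing y with
  | nil => simp [pvScan, pvCenters]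
  | cons c t ih => simp only [pvScan, pvCenters, List.zip_cons_cons, List.map_cons, ih]

-- ===== VERDICT (by name: the statement is the Claim_ definition above) =====
theorem generate_ytick_inputs_spec : Claim_equal_generate_ytick_inputs := by
  intro ctc _
  unfold Spec_generate_ytick_inputs generate_ytick_inputs generate_ytick_inputs_alt
  simp only
  have hB := pvB_offsets
    ((PySem.List.sorted (PySem.Dict.ofList ctc).keys (fun x => x) false).map
      (fun c => (((PySem.Dict.ofList ctc).getD c []).length : Int))) [] 0
  simp only [List.nil_append] at hB
  rw [hB, pvB_centers,
    pvA_fold (fun c => (((PySem.Dict.ofList ctc).getD c []).length : Int))]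
  simp
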